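-- pv_equiv track=rewrite | github.com/ITanmayee/Codeforce | Eleven.py | frameName
-- ===== SOURCE A (Python) =====
-- def frameName(no_of_chars):
--     if no_of_chars < 2:
--         return 'O' * no_of_chars
--     name = ['O'] + ['O'] + ['o'] * (no_of_chars - 2)
--     f1, f2 = 1, 1
--
--
--     while f1 + f2 <= no_of_chars:
--         f3 = f1 + f2
--         name[f3 - 1] = 'O'
--         f2, f1 = f3, f2
--
--     return ''.join(name)
-- ===== SOURCE B (Python) =====
-- def frameName(no_of_chars):
--     # Build the frame as a concatenation of runs: for each Fibonacci position f
--     # (1, 2, 3, 5, 8, ...) emit the gap of 'o's since the previous one followed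
--     # by 'O', then the trailing run of 'o's after the last Fibonacci <= n.
--     n = no_of_chars
--     parts = []
--     prev = 0
--     a, b = 1, 2
--     while a <= n:
--         parts.append('o' * (a - prev - 1) + 'O')
--         prev = a
--         a, b = b, a + b
--     parts.append('o' * (n - prev))
--     return ''.join(parts)
-- ===== Notes on version B (the rewrite author's own statement) =====
-- stated objective: alternative
-- what changed: B builds the string as a concatenation of runs (the gap of 'o's before each Fibonacci position followed by an 'O', plus a trailing run), touching only one piece per Fibonacci number, instead of A's pre-filled character list with in-place writes at Fibonacci indices and a separate short-input guard.
import Mathlib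
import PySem

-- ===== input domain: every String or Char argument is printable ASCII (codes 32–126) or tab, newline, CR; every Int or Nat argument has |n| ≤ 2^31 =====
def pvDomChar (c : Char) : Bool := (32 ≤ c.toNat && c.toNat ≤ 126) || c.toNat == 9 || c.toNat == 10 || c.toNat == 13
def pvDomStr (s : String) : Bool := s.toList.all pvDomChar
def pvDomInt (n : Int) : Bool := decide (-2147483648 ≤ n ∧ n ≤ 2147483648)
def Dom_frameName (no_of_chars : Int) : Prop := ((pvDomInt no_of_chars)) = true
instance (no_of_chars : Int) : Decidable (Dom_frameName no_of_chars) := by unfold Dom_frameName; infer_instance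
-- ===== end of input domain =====

-- B builds the frame as a concatenation of runs ('o'-gap before each Fibonacci position, then 'O',
-- then a trailing 'o'-run), instead of A's pre-filled list with in-place writes; alternative, not faster.

-- ===== PORT A =====
-- A's while loop: state (f1, f2); while f1+f2 ≤ n it writes 'O' at 0-based index f1+f2-1.
-- The hypotheses 1 ≤ f1 ≤ f2 hold at the call site and serve only termination.
def frameNameLoop (n f1 f2 : Int) (name : List Char)
    (h1 : 1 ≤ f1) (h2 : f1 ≤ f2) : List Char :=
  if h : f1 + f2 ≤ n then
    frameNameLoop n f2 (f1 + f2) (PySem.List.pySetD name (f1 + f2 - 1) 'O')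
      (by omega) (by omega)
  else name
termination_by (n + 1 - (f1 + f2)).toNat
decreasing_by omega

def frameName (no_of_chars : Int) : String :=
  if no_of_chars < 2 then String.ofList (PySem.List.pyRepeat ['O'] no_of_chars)
  else
    String.ofList (frameNameLoop no_of_chars 1 1
      (['O'] ++ ['O'] ++ PySem.List.pyRepeat ['o'] (no_of_chars - 2))
      (by omega) (by omega))

-- ===== PORT B =====
-- B's while loop: state (prev, a, b); while a ≤ n it emits the run 'o'*(a-prev-1) + 'O';
-- afterwards the trailing run 'o'*(n-prev). ''.join of the appended parts is the concatenation
-- performed here directly. The hypotheses 0 ≤ prev < a < b hold at the call site (termination only).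
def frameNameRuns (n prev a b : Int) (hp : 0 ≤ prev) (h1 : prev < a) (h2 : a < b) : List Char :=
  if h : a ≤ n then
    (List.replicate (a - prev - 1).toNat 'o' ++ ['O']) ++
      frameNameRuns n a b (a + b) (by omega) (by omega) (by omega)
  else List.replicate (n - prev).toNat 'o'
termination_by (n + 1 - a).toNat
decreasing_by omega

def frameName_alt (no_of_chars : Int) : String :=
  String.ofList (frameNameRuns no_of_chars 0 1 2 (by omega) (by omega) (by omega))

-- ===== PRECONDITION & SPEC =====
def Spec_frameName (no_of_chars : Int) (out : String) : Prop := out = frameName_alt no_of_chars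
instance (no_of_chars : Int) (out : String) : Decidable (Spec_frameName no_of_chars out) := by unfold Spec_frameName; infer_instance

-- ===== CLAIM (what is proved, stated in full; the proofs are below) =====
def Claim_equal_frameName : Prop := ∀ (no_of_chars : Int), Dom_frameName no_of_chars → Spec_frameName no_of_chars (frameName no_of_chars)

-- ===== LEMMAS AND PROOFS =====

-- The (1-based) indices at which A's loop writes 'O', as a list; the guard carries the
-- invariant 1 ≤ f1 ≤ f2 of the reachable states so the definition is total without proof args.
def wlist (n f1 f2 : Int) : List Int :=
  if _h : 1 ≤ f1 ∧ f1 ≤ f2 ∧ f1 + f2 ≤ n then (f1 + f2) :: wlist n f2 (f1 + f2)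
  else []
termination_by (n + 1 - (f1 + f2)).toNat
decreasing_by omega

-- The Fibonacci positions B's loop emits an 'O' for, as a list, with the same invariant trick.
def flist (n a b : Int) : List Int :=
  if _h : 1 ≤ a ∧ a ≤ b ∧ a ≤ n then a :: flist n b (a + b)
  else []
termination_by (n + 1 - a).toNat + (n + 1 - b).toNat
decreasing_by omega

lemma mem_wlist_bounds {n f1 f2 x : Int} (hx : x ∈ wlist n f1 f2) : 2 ≤ x ∧ x ≤ n := by
  fun_induction wlist n f1 f2 with
  | case1 a b e ih =>
      rcases List.mem_cons.mp hx with h | h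
      · omega
      · have := ih h; omega
  | case2 => simp at hx

lemma mem_flist_bounds {n a b x : Int} (hx : x ∈ flist n a b) : a ≤ x ∧ x ≤ n := by
  fun_induction flist n a b with
  | case1 a b e ih =>
      rcases List.mem_cons.mp hx with h | h
      · omega
      · have := ih h; omega
  | case2 => simp at hx

lemma wlist_eq_flist {n f1 f2 : Int} (h1 : 1 ≤ f1) (h2 : f1 ≤ f2) :
    wlist n f1 f2 = flist n (f1 + f2) (f1 + 2 * f2) := by
  fun_induction wlist n f1 f2 with
  | case1 a b e ih =>
      rw [flist]
      rw [dif_pos (by omega : 1 ≤ a + b ∧ a + b ≤ a + 2 * b ∧ a + b ≤ n)]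
      have ih' := ih (by omega) (by omega)
      have e1 : b + (a + b) = a + 2 * b := by ring
      have e2 : b + 2 * (a + b) = (a + b) + (a + 2 * b) := by ring
      rw [e1, e2] at ih'
      rw [ih']
  | case2 a b e =>
      rw [flist, dif_neg (by omega)]

lemma frameNameLoop_getElem? {n f1 f2 : Int} {name : List Char} {h1 : 1 ≤ f1} {h2 : f1 ≤ f2}
    (hn : n ≤ (name.length : Int)) (j : Nat) :
    (frameNameLoop n f1 f2 name h1 h2)[j]? =
      if ((j : Int) + 1) ∈ wlist n f1 f2 then some 'O' else name[j]? := by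
  fun_induction frameNameLoop n f1 f2 name h1 h2 with
  | case1 a b nm c d e ih =>
      rw [wlist, dif_pos (by omega : 1 ≤ a ∧ a ≤ b ∧ a + b ≤ n)]
      have hset : PySem.List.pySetD nm (a + b - 1) 'O' = nm.set (a + b - 1).toNat 'O' :=
        PySem.List.pySetD_of_nonneg nm 'O' (by omega)
      have hlen : (PySem.List.pySetD nm (a + b - 1) 'O').length = nm.length := by
        rw [hset]; simp
      have ih' := ih (by rw [hlen]; exact_mod_cast hn)
      rw [ih', hset]
      by_cases hw : ((j : Int) + 1) ∈ wlist n b (a + b)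
      · simp [hw]
      · by_cases heq : (j : Int) + 1 = a + b
        · rw [if_neg hw, if_pos (by simp [heq]), List.getElem?_set,
            if_pos (by omega), if_pos (by omega)]
        · rw [if_neg hw, if_neg (by simp [heq, hw]), List.getElem?_set, if_neg (by omega)]
  | case2 a b nm c d e =>
      rw [wlist, dif_neg (by omega)]
      rw [if_neg (List.not_mem_nil)]

-- B's run concatenation equals the dense picture: one character per position prev+1 … n,
-- 'O' exactly at the positions flist records.
lemma frameNameRuns_eq_map {n prev a b : Int} {hp : 0 ≤ prev} {h1 : prev < a} {h2 : a < b} :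
    frameNameRuns n prev a b hp h1 h2 =
      (PySem.List.pyRange (prev + 1) (n + 1) 1).map
        (fun i => if i ∈ flist n a b then 'O' else 'o') := by
  fun_induction frameNameRuns n prev a b hp h1 h2 with
  | case1 prev a b hp h1 h2 h ih =>
      rw [flist, dif_pos (by omega : 1 ≤ a ∧ a ≤ b ∧ a ≤ n)]
      rw [PySem.List.pyRange_one_append (prev + 1) a (n + 1) (by omega) (by omega),
        PySem.List.pyRange_one_cons (by omega : a < n + 1)]
      rw [List.map_append, List.map_cons]
      have hgap : (PySem.List.pyRange (prev + 1) a 1).map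
          (fun i => if i ∈ a :: flist n b (a + b) then 'O' else 'o')
          = List.replicate (a - prev - 1).toNat 'o' := by
        rw [List.map_congr_left (g := fun _ => 'o') (by
          intro x hx
          have hb := (PySem.List.mem_pyRange_one.mp hx)
          rw [if_neg]
          simp only [List.mem_cons]
          rintro (rfl | hm)
          · omega
          · have := mem_flist_bounds hm; omega)]
        rw [List.map_const', PySem.List.length_pyRange_one]
        congr 1
        omega
      have htail : (PySem.List.pyRange (a + 1) (n + 1) 1).map
          (fun i => if i ∈ a :: flist n b (a + b) then 'O' else 'o')
          = (PySem.List.pyRange (a + 1) (n + 1) 1).map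
            (fun i => if i ∈ flist n b (a + b) then 'O' else 'o') := by
        apply List.map_congr_left
        intro x hx
        have hb := (PySem.List.mem_pyRange_one.mp hx)
        simp only [List.mem_cons]
        have : ¬ x = a := by omega
        simp [this]
      rw [hgap, htail, ← ih, if_pos (List.mem_cons_self)]
      simp
  | case2 prev a b hp h1 h2 h =>
      rw [flist, dif_neg (by omega)]
      simp only [List.not_mem_nil, if_false]
      rw [List.map_congr_left (g := fun _ => 'o') (fun x _ => rfl)]
      rw [List.map_const', PySem.List.length_pyRange_one]
      congr 1
      omega

lemma frameName_eq_alt_of_nonpos {n : Int} (h : n ≤ 0) : frameName n = frameName_alt n := by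
  rw [frameName, if_pos (by omega), frameName_alt, frameNameRuns, dif_neg (by omega)]
  rw [PySem.List.pyRepeat_singleton]
  have h1 : n.toNat = 0 := by omega
  have h2 : (n - 0).toNat = 0 := by omega
  simp [h1]

lemma frameName_eq_alt_one : frameName 1 = frameName_alt 1 := by
  rw [frameName, if_pos (by norm_num), frameName_alt]
  rw [frameNameRuns, dif_pos (by norm_num), frameNameRuns, dif_neg (by norm_num)]
  rw [PySem.List.pyRepeat_singleton]
  norm_num

lemma frameName_eq_alt_of_ge_two {n : Int} (h2 : 2 ≤ n) : frameName n = frameName_alt n := by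
  rw [frameName, if_neg (by omega), frameName_alt, frameNameRuns_eq_map,
    show (0 : Int) + 1 = 1 from rfl]
  congr 1
  rw [PySem.List.pyRepeat_singleton]
  set init : List Char := ['O'] ++ ['O'] ++ List.replicate (n - 2).toNat 'o' with hinit
  have hlen : init.length = n.toNat := by simp [hinit]; omega
  have hni : n ≤ (init.length : Int) := by rw [hlen]; omega
  have hmem : ∀ x : Int, (x ∈ flist n 1 2) ↔ (x = 1 ∨ x ∈ wlist n 1 1) := by
    intro x
    have hw : wlist n 1 1 = flist n 2 3 := by
      have h := wlist_eq_flist (n := n) (f1 := 1) (f2 := 1) (by norm_num) (by norm_num)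
      norm_num at h
      exact h
    rw [flist, dif_pos (by omega : 1 ≤ (1:Int) ∧ (1:Int) ≤ 2 ∧ 1 ≤ n)]
    have e3 : (1 : Int) + 2 = 3 := by norm_num
    rw [e3, hw]
    simp
  apply List.ext_getElem?
  intro j
  rw [frameNameLoop_getElem? hni j]
  by_cases hj : j < n.toNat
  · have hrj : (PySem.List.pyRange 1 (n + 1) 1)[j]? = some (1 + (j : Int)) := by
      rw [PySem.List.getElem?_pyRange_one,
        if_pos (by omega : j < ((n + 1) - 1).toNat)]
    rw [List.getElem?_map, hrj]
    simp only [Option.map_some]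
    rw [show (1 : Int) + (j : Int) = (j : Int) + 1 by ring]
    simp only [hmem ((j : Int) + 1)]
    match j with
    | 0 =>
        have h1w : (1 : Int) ∉ wlist n 1 1 := fun h => by have := mem_wlist_bounds h; omega
        norm_num [h1w, hinit]
    | 1 =>
        have h2w : (2 : Int) ∈ wlist n 1 1 := by
          rw [wlist, dif_pos (by omega : 1 ≤ (1:Int) ∧ (1:Int) ≤ 1 ∧ 1 + 1 ≤ n)]
          norm_num
        have : ((1 : Nat) : Int) + 1 = 2 := by norm_num
        rw [this, if_pos h2w, if_pos (by norm_num [h2w])]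
    | (k + 2) =>
        have hne1 : ¬(((k + 2 : Nat) : Int) + 1 = 1) := by push_cast; omega
        by_cases hw : (((k + 2 : Nat) : Int) + 1) ∈ wlist n 1 1
        · rw [if_pos hw, if_pos (Or.inr hw)]
        · rw [if_neg hw, if_neg (by tauto)]
          rw [hinit]
          have hkr : k < (n - 2).toNat := by omega
          simp [hkr]
  · have hrn : (PySem.List.pyRange 1 (n + 1) 1)[j]? = none := by
      apply List.getElem?_eq_none
      rw [PySem.List.length_pyRange_one]; omega
    rw [List.getElem?_map, hrn]
    have hwno : ((j : Int) + 1) ∉ wlist n 1 1 := fun h => by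
      have := mem_wlist_bounds h; omega
    rw [if_neg hwno, List.getElem?_eq_none (by omega : init.length ≤ j)]
    rfl

-- ===== VERDICT (by name: the statement is the Claim_ definition above) =====
theorem frameName_spec : Claim_equal_frameName := by
  intro n _
  unfold Spec_frameName
  by_cases hlt : n < 2
  · by_cases hz : n ≤ 0
    · exact frameName_eq_alt_of_nonpos hz
    · have : n = 1 := by omega
      rw [this]; exact frameName_eq_alt_one
  · exact frameName_eq_alt_of_ge_two (by omega)
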